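-- pv_equiv track=rewrite | github.com/nothingtosurprise/Helios | tools/gradio/comparison/gradio_compare_diff-video.py | get_step_idx_info
-- ===== SOURCE A (Python) =====
-- def get_step_idx_info(video_map):
--     """Extract step and idx information from video mapping"""
--     all_steps = set()
--     all_indices = set()
--     idx_step_map = {}  # {idx: [step1, step2, ...]}
--
--     for step, idx in video_map.keys():
--         all_steps.add(step)
--         all_indices.add(idx)
--         if idx not in idx_step_map:
--             idx_step_map[idx] = []
--         idx_step_map[idx].append(step)
--
--     # Sort
--     for idx in idx_step_map:
--         idx_step_map[idx].sort()
--
--     return sorted(all_steps), sorted(all_indices), idx_step_map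
-- ===== SOURCE B (Python) =====
-- def get_step_idx_info(video_map):
--     """Extract step and idx information from video mapping"""
--     keys = list(video_map.keys())
--     by_step = sorted(keys, key=lambda t: t[0])          # one stable sort by step only
--     idx_step_map = {idx: [] for _, idx in keys}          # idx keys in A's insertion order
--     for step, idx in by_step:
--         idx_step_map[idx].append(step)                   # groups come out already sorted
--     all_steps = sorted({step for step, _ in keys})
--     all_indices = sorted(idx_step_map)
--     return all_steps, all_indices, idx_step_map
-- ===== Notes on version B (the rewrite author's own statement) =====
-- stated objective: alternative
-- what changed: B sorts the key list once by step (stable) and fills each idx group in a single pass over the sorted keys, so groups are born sorted and the per-group .sort() loop disappears; steps/indices come from set comprehensions over the key list.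
import Mathlib
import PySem

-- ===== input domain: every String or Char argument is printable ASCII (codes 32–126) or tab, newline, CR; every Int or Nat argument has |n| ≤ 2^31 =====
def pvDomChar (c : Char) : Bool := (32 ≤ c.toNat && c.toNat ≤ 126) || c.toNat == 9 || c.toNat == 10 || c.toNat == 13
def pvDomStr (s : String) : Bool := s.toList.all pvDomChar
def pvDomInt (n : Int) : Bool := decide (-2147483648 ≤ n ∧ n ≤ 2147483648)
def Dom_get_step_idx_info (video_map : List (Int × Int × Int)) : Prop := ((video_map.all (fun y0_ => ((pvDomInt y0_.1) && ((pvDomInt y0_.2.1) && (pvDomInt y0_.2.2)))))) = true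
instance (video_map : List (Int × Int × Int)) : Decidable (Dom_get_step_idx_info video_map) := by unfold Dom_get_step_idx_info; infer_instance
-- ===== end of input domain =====

-- B replaces A's per-idx sort loop with ONE stable sort of the keys by step and a single
-- grouping pass over the sorted keys (same return value; no speed claim).

-- ===== PORT A =====
-- video_map is the dict {(step, idx): v}; iterating .keys() visits the distinct (step, idx)
-- pairs in first-insertion order = PySem.List.dedup of the association list's key parts.
def get_step_idx_info (video_map : List (Int × Int × Int)) : List Int × List Int × (List (Int × List Int)) :=
  let keys := PySem.List.dedup (video_map.map (fun t => (t.1, t.2.1)))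
  let acc := keys.foldl
    (fun (acc : PySem.Set Int × PySem.Set Int × PySem.Dict Int (List Int)) p =>
      (PySem.Set.add acc.1 p.1, PySem.Set.add acc.2.1 p.2,
        (if (acc.2.2).contains p.2 then acc.2.2 else (acc.2.2).insert p.2 ([] : List Int)).modify
          p.2 [] (· ++ [p.1])))
    ((PySem.Set.empty : PySem.Set Int), (PySem.Set.empty : PySem.Set Int),
      (PySem.Dict.empty : PySem.Dict Int (List Int)))
  let m := (acc.2.2).keys.foldl
    (fun d k => d.modify k [] (fun l => PySem.List.sorted l (fun x => x) false)) acc.2.2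
  (PySem.List.sorted acc.1 (fun x => x) false, PySem.List.sorted acc.2.1 (fun x => x) false,
    m.items)

-- ===== PORT B =====
def get_step_idx_info_alt (video_map : List (Int × Int × Int)) : List Int × List Int × (List (Int × List Int)) :=
  let keys := PySem.List.dedup (video_map.map (fun t => (t.1, t.2.1)))
  let by_step := PySem.List.sorted keys (fun t => t.1) false
  let d0 : PySem.Dict Int (List Int) := keys.foldl (fun d p => d.insert p.2 []) PySem.Dict.empty
  let m := by_step.foldl (fun d p => d.modify p.2 [] (· ++ [p.1])) d0
  (PySem.List.sorted (PySem.Set.ofList (keys.map (fun t => t.1))) (fun x => x) false,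
    PySem.List.sorted m.keys (fun x => x) false,
    m.items)

-- ===== PRECONDITION & SPEC =====
def Spec_get_step_idx_info (video_map : List (Int × Int × Int)) (out : List Int × List Int × (List (Int × List Int))) : Prop := out = get_step_idx_info_alt video_map
instance (video_map : List (Int × Int × Int)) (out : List Int × List Int × (List (Int × List Int))) : Decidable (Spec_get_step_idx_info video_map out) := by unfold Spec_get_step_idx_info; infer_instance

-- ===== CLAIM (what is proved, stated in full; the proofs are below) =====
def Claim_equal_get_step_idx_info : Prop := ∀ (video_map : List (Int × Int × Int)), Dom_get_step_idx_info video_map → Spec_get_step_idx_info video_map (get_step_idx_info video_map)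

-- ===== LEMMAS AND PROOFS =====

theorem set_add_of_mem {s : PySem.Set Int} {x : Int} (h : x ∈ s) : PySem.Set.add s x = s := by
  simp [PySem.Set.add, PySem.Set.contains, h]

theorem set_add_of_not_mem {s : PySem.Set Int} {x : Int} (h : x ∉ s) :
    PySem.Set.add s x = s ++ [x] := by
  simp [PySem.Set.add, PySem.Set.contains, h]

theorem set_update_cons (s : PySem.Set Int) (a : Int) (t : List Int) :
    PySem.Set.update s (a :: t) = PySem.Set.update (PySem.Set.add s a) t := rfl

theorem set_update_of_subset (l : List Int) (s : PySem.Set Int) (h : ∀ x ∈ l, x ∈ s) :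
    PySem.Set.update s l = s := by
  induction l generalizing s with
  | nil => rfl
  | cons a t ih =>
    rw [set_update_cons, set_add_of_mem (h a (by simp))]
    exact ih s (fun x hx => h x (by simp [hx]))

theorem set_update_nil_eq_ofList (l : List Int) :
    PySem.Set.update ([] : PySem.Set Int) l = PySem.Set.ofList l := by
  rw [PySem.Set.ofList_eq_foldl]; rfl

theorem keys_modify_add (d : PySem.Dict Int (List Int)) (k : Int) (d0 : List Int)
    (f : List Int → List Int) : (d.modify k d0 f).keys = PySem.Set.add d.keys k := by
  rw [PySem.Dict.keys_modify]
  cases h : d.contains k with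
  | true =>
    rw [PySem.Dict.keys_insert_of_contains _ _ h,
      set_add_of_mem ((PySem.Dict.contains_iff_mem_keys d k).mp h)]
  | false =>
    rw [PySem.Dict.keys_insert_of_not_contains _ _ h,
      set_add_of_not_mem (fun hm => by
        rw [(PySem.Dict.contains_iff_mem_keys d k).mpr hm] at h; exact Bool.noConfusion h)]

theorem stepG_keys (d : PySem.Dict Int (List Int)) (p : Int × Int) :
    ((if d.contains p.2 then d else d.insert p.2 ([] : List Int)).modify p.2 []
        (· ++ [p.1])).keys = PySem.Set.add d.keys p.2 := by
  cases h : d.contains p.2 with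
  | true => rw [if_pos rfl, keys_modify_add]
  | false =>
    rw [if_neg (by simp), keys_modify_add,
      PySem.Dict.keys_insert_of_not_contains _ _ h]
    have hnm : p.2 ∉ d.keys := fun hm => by
      rw [(PySem.Dict.contains_iff_mem_keys d p.2).mpr hm] at h; exact Bool.noConfusion h
    rw [set_add_of_mem (by simp), set_add_of_not_mem hnm]

theorem stepG_getD (d : PySem.Dict Int (List Int)) (p : Int × Int) (j : Int) :
    ((if d.contains p.2 then d else d.insert p.2 ([] : List Int)).modify p.2 []
        (· ++ [p.1])).getD j []
      = if j = p.2 then d.getD p.2 [] ++ [p.1] else d.getD j [] := by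
  cases h : d.contains p.2 with
  | true => rw [if_pos rfl, PySem.Dict.getD_modify]
  | false =>
    rw [if_neg (by simp), PySem.Dict.getD_modify]
    by_cases hj : j = p.2
    · subst hj
      rw [PySem.Dict.getD_insert]
      simp [PySem.Dict.getD_of_not_contains d _ h]
    · simp only [if_neg hj]
      rw [PySem.Dict.getD_insert, if_neg hj]

theorem foldA_split (l : List (Int × Int)) (st ix : PySem.Set Int)
    (d : PySem.Dict Int (List Int)) :
    l.foldl
        (fun (acc : PySem.Set Int × PySem.Set Int × PySem.Dict Int (List Int)) p =>
          (PySem.Set.add acc.1 p.1, PySem.Set.add acc.2.1 p.2,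
            (if (acc.2.2).contains p.2 then acc.2.2 else (acc.2.2).insert p.2 ([] : List Int)).modify p.2 [] (· ++ [p.1])))
        (st, ix, d)
      = (l.foldl (fun s p => PySem.Set.add s p.1) st,
         l.foldl (fun s p => PySem.Set.add s p.2) ix,
         l.foldl (fun d p =>
           (if d.contains p.2 then d else d.insert p.2 ([] : List Int)).modify p.2 [] (· ++ [p.1])) d) := by
  induction l generalizing st ix d with
  | nil => rfl
  | cons p t ih => simp only [List.foldl_cons]; exact ih _ _ _

theorem foldG_keys (l : List (Int × Int)) (d : PySem.Dict Int (List Int)) :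
    (l.foldl (fun d p =>
        (if d.contains p.2 then d else d.insert p.2 ([] : List Int)).modify p.2 [] (· ++ [p.1])) d).keys
      = PySem.Set.update d.keys (l.map (fun p => p.2)) := by
  induction l generalizing d with
  | nil => rfl
  | cons p t ih =>
    simp only [List.foldl_cons, List.map_cons]
    rw [ih, stepG_keys, set_update_cons]

theorem foldG_getD (l : List (Int × Int)) (d : PySem.Dict Int (List Int)) (j : Int) :
    (l.foldl (fun d p =>
        (if d.contains p.2 then d else d.insert p.2 ([] : List Int)).modify p.2 [] (· ++ [p.1])) d).getD j []
      = d.getD j [] ++ (l.filter (fun p => p.2 == j)).map (fun p => p.1) := by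
  induction l generalizing d with
  | nil => simp
  | cons p t ih =>
    simp only [List.foldl_cons, List.filter_cons]
    rw [ih, stepG_getD]
    by_cases hj : j = p.2
    · subst hj
      simp [List.append_assoc]
    · have hb : (p.2 == j) = false := beq_eq_false_iff_ne.mpr (fun e => hj e.symm)
      simp [hj, hb]

theorem foldM_keys (l : List (Int × Int)) (d : PySem.Dict Int (List Int)) :
    (l.foldl (fun d p => d.modify p.2 [] (· ++ [p.1])) d).keys
      = PySem.Set.update d.keys (l.map (fun p => p.2)) := by
  induction l generalizing d with
  | nil => rfl
  | cons p t ih =>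
    simp only [List.foldl_cons, List.map_cons]
    rw [ih, keys_modify_add, set_update_cons]

theorem foldM_getD (l : List (Int × Int)) (d : PySem.Dict Int (List Int)) (j : Int) :
    (l.foldl (fun d p => d.modify p.2 [] (· ++ [p.1])) d).getD j []
      = d.getD j [] ++ (l.filter (fun p => p.2 == j)).map (fun p => p.1) := by
  induction l generalizing d with
  | nil => simp
  | cons p t ih =>
    simp only [List.foldl_cons, List.filter_cons]
    rw [ih, PySem.Dict.getD_modify]
    by_cases hj : j = p.2
    · subst hj
      simp [List.append_assoc]
    · have hb : (p.2 == j) = false := beq_eq_false_iff_ne.mpr (fun e => hj e.symm)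
      simp [hj, hb]

theorem foldIns_getD (l : List (Int × Int)) (d : PySem.Dict Int (List Int)) (j : Int)
    (h : d.getD j [] = []) :
    (l.foldl (fun d p => d.insert p.2 ([] : List Int)) d).getD j [] = [] := by
  induction l generalizing d with
  | nil => exact h
  | cons p t ih =>
    simp only [List.foldl_cons]
    refine ih _ ?_
    rw [PySem.Dict.getD_insert]
    by_cases hj : j = p.2 <;> simp [hj, h]

theorem foldS_keys (L : List Int) (d : PySem.Dict Int (List Int)) :
    (L.foldl (fun d k => d.modify k [] (fun l => PySem.List.sorted l (fun x => x) false)) d).keys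
      = PySem.Set.update d.keys L := by
  induction L generalizing d with
  | nil => rfl
  | cons k t ih =>
    simp only [List.foldl_cons]
    rw [ih, keys_modify_add, set_update_cons]

theorem foldS_getD (L : List Int) (hL : L.Nodup) (d : PySem.Dict Int (List Int)) (j : Int) :
    (L.foldl (fun d k => d.modify k [] (fun l => PySem.List.sorted l (fun x => x) false)) d).getD j []
      = if j ∈ L then PySem.List.sorted (d.getD j []) (fun x => x) false else d.getD j [] := by
  induction L generalizing d with
  | nil => simp
  | cons k t ih =>
    obtain ⟨hk, ht⟩ := List.nodup_cons.mp hL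
    simp only [List.foldl_cons]
    rw [ih ht]
    by_cases hj : j = k
    · subst hj
      have hjt : j ∉ t := hk
      rw [if_neg hjt, PySem.Dict.getD_modify, if_pos rfl, if_pos (by simp)]
    · have hmem : (j ∈ k :: t) ↔ j ∈ t := by simp [hj]
      rw [PySem.Dict.getD_modify]
      simp only [if_neg hj]
      by_cases hjt : j ∈ t <;> simp [hmem, hjt]

theorem sorted_filter_comm (K : List (Int × Int)) (k : Int) :
    PySem.List.sorted ((K.filter (fun p => p.2 == k)).map (fun p => p.1)) (fun x => x) false
      = ((PySem.List.sorted K (fun t => t.1) false).filter (fun p => p.2 == k)).map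
          (fun p => p.1) := by
  apply PySem.List.sorted_id_eq_of_perm_of_pairwise
  · exact ((PySem.List.sorted_perm K (fun t => t.1) false).filter _).map _
  · have hp := PySem.List.sorted_pairwise K (fun t => t.1)
    have hf := hp.sublist (List.filter_sublist (l := PySem.List.sorted K (fun t => t.1) false)
      (p := fun p => p.2 == k))
    exact (List.pairwise_map).mpr hf

theorem get_step_idx_info_eq (video_map : List (Int × Int × Int)) :
    get_step_idx_info video_map = get_step_idx_info_alt video_map := by
  unfold get_step_idx_info get_step_idx_info_alt
  dsimp only
  rw [foldA_split]
  set K := PySem.List.dedup (video_map.map (fun t => (t.1, t.2.1))) with hK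
  simp only [Prod.mk.injEq]
  -- the distinct idx list, shared by both sides
  have hKA :
      (K.foldl (fun d p =>
        (if d.contains p.2 then d else d.insert p.2 ([] : List Int)).modify p.2 [] (· ++ [p.1]))
        (PySem.Dict.empty : PySem.Dict Int (List Int))).keys
      = PySem.Set.ofList (K.map (fun p => p.2)) := by
    rw [foldG_keys, PySem.Dict.keys_empty, set_update_nil_eq_ofList]
  have hd0keys :
      (K.foldl (fun d p => d.insert p.2 ([] : List Int))
        (PySem.Dict.empty : PySem.Dict Int (List Int))).keys
      = PySem.Set.ofList (K.map (fun p => p.2)) := by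
    rw [PySem.Dict.keys_foldl_insert_key K (fun p => p.2) (fun _ _ => ([] : List Int))
      PySem.Dict.empty, PySem.Dict.keys_empty, set_update_nil_eq_ofList]
  have hmBkeys :
      ((PySem.List.sorted K (fun t => t.1) false).foldl
          (fun d p => d.modify p.2 [] (· ++ [p.1]))
          (K.foldl (fun d p => d.insert p.2 ([] : List Int))
            (PySem.Dict.empty : PySem.Dict Int (List Int)))).keys
      = PySem.Set.ofList (K.map (fun p => p.2)) := by
    rw [foldM_keys, hd0keys]
    refine set_update_of_subset _ _ ?_
    intro x hx
    rw [PySem.Set.mem_ofList]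
    simp only [List.mem_map] at hx ⊢
    obtain ⟨p, hp, rfl⟩ := hx
    exact ⟨p, (PySem.List.sorted_perm K (fun t => t.1) false).mem_iff.mp hp, rfl⟩
  refine ⟨?_, ?_, ?_⟩
  · -- sorted steps
    congr 1
    rw [PySem.Set.ofList_eq_foldl, List.foldl_map]
    rfl
  · -- sorted indices
    rw [hmBkeys]
    congr 1
    rw [PySem.Set.ofList_eq_foldl, List.foldl_map]
    rfl
  · -- the idx -> steps dict, as items
    have hnd : (PySem.Set.ofList (K.map (fun p => p.2))).Nodup := PySem.Set.nodup_ofList _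
    -- A side keys after the sort pass
    have hm2keys :
        ((K.foldl (fun d p =>
            (if d.contains p.2 then d else d.insert p.2 ([] : List Int)).modify p.2 [] (· ++ [p.1]))
            (PySem.Dict.empty : PySem.Dict Int (List Int))).keys.foldl
          (fun d k => d.modify k [] (fun l => PySem.List.sorted l (fun x => x) false))
          (K.foldl (fun d p =>
            (if d.contains p.2 then d else d.insert p.2 ([] : List Int)).modify p.2 [] (· ++ [p.1]))
            (PySem.Dict.empty : PySem.Dict Int (List Int)))).keys
        = PySem.Set.ofList (K.map (fun p => p.2)) := by
      rw [foldS_keys, hKA, set_update_of_subset _ _ (fun x hx => hx)]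
    rw [PySem.Dict.items_eq_map_keys _ (by rw [hm2keys]; exact hnd) ([] : List Int),
      PySem.Dict.items_eq_map_keys _ (by rw [hmBkeys]; exact hnd) ([] : List Int),
      hm2keys, hmBkeys]
    refine List.map_congr_left ?_
    intro k hk
    have hA := foldS_getD
      ((K.foldl (fun d p =>
          (if d.contains p.2 then d else d.insert p.2 ([] : List Int)).modify p.2 [] (· ++ [p.1]))
          (PySem.Dict.empty : PySem.Dict Int (List Int))).keys)
      (by rw [hKA]; exact hnd)
      (K.foldl (fun d p =>
          (if d.contains p.2 then d else d.insert p.2 ([] : List Int)).modify p.2 [] (· ++ [p.1]))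
          (PySem.Dict.empty : PySem.Dict Int (List Int))) k
    rw [hA, hKA, if_pos hk, foldG_getD, PySem.Dict.getD_empty, List.nil_append,
      foldM_getD, foldIns_getD _ _ _ (by rw [PySem.Dict.getD_empty]), List.nil_append,
      sorted_filter_comm]

-- ===== VERDICT (by name: the statement is the Claim_ definition above) =====
theorem get_step_idx_info_spec : Claim_equal_get_step_idx_info := by
  intro video_map _
  unfold Spec_get_step_idx_info
  exact get_step_idx_info_eq video_map
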